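-- pv_equiv track=rewrite | github.com/AdrSchm/mpi-attributes-pass | mem-inst-count.py | findCommentStart
-- ===== SOURCE A (Python) =====
-- def findCommentStart(line):
--     # Extend this list to use other characters as well
--     commentChars = ['#', ';']
--     commentStarts = -1
--     # Find positions of the characters in the current line
--     commentCharPos = [line.find(commentChar) for commentChar in commentChars]
--     # Find the smallest position, ignore -1 from non-existent characters
--     for pos in commentCharPos:
--         if (commentStarts == -1) or (pos != -1 and pos < commentStarts):
--             commentStarts = pos
--     return commentStarts
-- ===== SOURCE B (Python) =====
-- def findCommentStart(line):
--     for i, c in enumerate(line):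
--         if c == '#' or c == ';':
--             return i
--     return -1
-- ===== Notes on version B (the rewrite author's own statement) =====
-- stated objective: simpler
-- what changed: Replaces the two full str.find scans plus a min-selection loop with a single left-to-right enumerate pass that returns the first index holding '#' or ';'.
import Mathlib
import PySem

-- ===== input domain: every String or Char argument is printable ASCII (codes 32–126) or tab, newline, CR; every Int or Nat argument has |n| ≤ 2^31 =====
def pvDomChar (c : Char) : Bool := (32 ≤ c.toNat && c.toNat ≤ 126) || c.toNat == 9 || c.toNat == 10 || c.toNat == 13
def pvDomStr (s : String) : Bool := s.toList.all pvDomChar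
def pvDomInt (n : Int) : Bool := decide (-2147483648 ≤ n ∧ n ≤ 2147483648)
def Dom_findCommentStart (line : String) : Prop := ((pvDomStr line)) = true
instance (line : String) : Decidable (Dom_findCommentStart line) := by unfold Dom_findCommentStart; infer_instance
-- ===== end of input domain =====

-- B replaces A's two full str.find scans plus min-selection loop by one short-circuiting
-- left-to-right pass over the characters (objective: simpler).

-- ===== PORT A =====
def findCommentStart (line : String) : Int :=
  let commentChars : List String := ["#", ";"]
  let commentStarts : Int := -1
  let commentCharPos : List Int :=
    commentChars.map (fun commentChar => PySem.Str.find line commentChar)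
  commentCharPos.foldl
    (fun commentStarts pos =>
      if commentStarts = -1 ∨ (pos ≠ -1 ∧ pos < commentStarts) then pos else commentStarts)
    commentStarts

-- ===== PORT B =====
-- the 'for i, c in enumerate(line): if c == '#' or c == ';': return i' loop of Source B
def fcsScan : List Char → Nat → Int
  | [], _ => -1
  | c :: rest, i => if c = '#' ∨ c = ';' then (i : Int) else fcsScan rest (i + 1)

def findCommentStart_alt (line : String) : Int :=
  fcsScan line.toList 0

-- ===== PRECONDITION & SPEC =====
def Spec_findCommentStart (line : String) (out : Int) : Prop := out = findCommentStart_alt line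
instance (line : String) (out : Int) : Decidable (Spec_findCommentStart line out) := by unfold Spec_findCommentStart; infer_instance

-- ===== CLAIM (what is proved, stated in full; the proofs are below) =====
def Claim_equal_findCommentStart : Prop := ∀ (line : String), Dom_findCommentStart line → Spec_findCommentStart line (findCommentStart line)

-- ===== LEMMAS AND PROOFS =====

theorem singleton_prefix_iff (c : Char) (t : List Char) : [c] <+: t ↔ t.head? = some c := by
  cases t with
  | nil => simp
  | cons x xs =>
    constructor
    · rintro ⟨u, hu⟩
      cases hu; rfl
    · intro h
      simp at h
      exact ⟨xs, by simp [h]⟩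

theorem singleton_prefix_drop (c : Char) (l : List Char) (j : Nat) :
    [c] <+: l.drop j ↔ l[j]? = some c := by
  rw [singleton_prefix_iff, List.head?_drop]

theorem singleton_infix_iff (c : Char) (l : List Char) : [c] <:+: l ↔ c ∈ l := by
  constructor
  · intro h
    simpa using h.sublist.subset (List.mem_singleton_self c)
  · intro h
    obtain ⟨s, t, rfl⟩ := List.append_of_mem h
    exact ⟨s, t, by simp⟩

theorem findChar_pos (l : List Char) (c : Char) (h : 0 ≤ PySem.Chars.find l [c]) :
    l[(PySem.Chars.find l [c]).toNat]? = some c ∧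
      ∀ j < (PySem.Chars.find l [c]).toNat, l[j]? ≠ some c := by
  obtain ⟨h1, h2⟩ := PySem.Chars.find_spec h
  rw [singleton_prefix_drop] at h1
  refine ⟨h1, fun j hj hEq => h2 j hj ?_⟩
  rw [singleton_prefix_drop]
  exact hEq

theorem findChar_mem (l : List Char) (c : Char) (h : c ∈ l) : 0 ≤ PySem.Chars.find l [c] := by
  rw [PySem.Chars.find_nonneg_iff, singleton_infix_iff]
  exact h

-- characterisation of B's scan: either no comment char occurs, or it returns n + (the least index)
theorem fcsScan_cases (l : List Char) (n : Nat) :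
    (fcsScan l n = -1 ∧ ∀ j : Nat, l[j]? ≠ some '#' ∧ l[j]? ≠ some ';') ∨
      ∃ k : Nat, fcsScan l n = ((n + k : Nat) : Int) ∧
        (l[k]? = some '#' ∨ l[k]? = some ';') ∧
        ∀ j < k, l[j]? ≠ some '#' ∧ l[j]? ≠ some ';' := by
  induction l generalizing n with
  | nil => left; simp [fcsScan]
  | cons c rest ih =>
    by_cases hc : c = '#' ∨ c = ';'
    · right
      refine ⟨0, by simp [fcsScan, hc], ?_, by omega⟩
      rcases hc with h | h <;> simp [h]
    · rcases ih (n + 1) with ⟨h1, h2⟩ | ⟨k, hk, hmem, hmin⟩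
      · left
        refine ⟨by simp [fcsScan, hc, h1], fun j => ?_⟩
        cases j with
        | zero =>
          push Not at hc
          simp [hc.1, hc.2]
        | succ j => simpa using h2 j
      · right
        refine ⟨k + 1, ?_, by simpa using hmem, fun j hj => ?_⟩
        · simp [fcsScan, hc]
          rw [hk]; omega
        · cases j with
          | zero =>
            push Not at hc
            simp [hc.1, hc.2]
          | succ j => simpa using hmin j (by omega)

theorem mem_of_getElem?_some {l : List Char} {j : Nat} {c : Char} (h : l[j]? = some c) : c ∈ l :=
  List.mem_of_getElem? h

-- ===== VERDICT (by name: the statement is the Claim_ definition above) =====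
theorem findCommentStart_spec : Claim_equal_findCommentStart := by
  intro line _
  unfold Spec_findCommentStart findCommentStart findCommentStart_alt
  simp only [List.map, List.foldl, PySem.Str.find_eq]
  have h1 : ("#" : String).toList = ['#'] := rfl
  have h2 : (";" : String).toList = [';'] := rfl
  rw [h1, h2]
  set s := line.toList with hs
  set f1 := PySem.Chars.find s ['#'] with hf1
  set f2 := PySem.Chars.find s [';'] with hf2
  have hge1 : -1 ≤ f1 := PySem.Chars.neg_one_le_find s ['#']
  have hge2 : -1 ≤ f2 := PySem.Chars.neg_one_le_find s [';']
  rcases fcsScan_cases s 0 with ⟨hB, hnone⟩ | ⟨k, hB, hmem, hmin⟩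
  · -- no comment char: both finds are -1
    have e1 : f1 = -1 := by
      rcases lt_or_ge f1 0 with h | h
      · omega
      · obtain ⟨hg, _⟩ := findChar_pos s '#' h
        exact absurd hg (hnone _).1
    have e2 : f2 = -1 := by
      rcases lt_or_ge f2 0 with h | h
      · omega
      · obtain ⟨hg, _⟩ := findChar_pos s ';' h
        exact absurd hg (hnone _).2
    simp [e1, e2, hB]
  · -- first comment char at index k
    simp only [Nat.zero_add] at hB
    rw [hB]
    -- whichever char sits at k bounds the corresponding find from above
    have hk_lt : ∀ c : Char, s[k]? = some c → 0 ≤ PySem.Chars.find s [c] →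
        (PySem.Chars.find s [c]).toNat ≤ k := by
      intro c hc hpos
      by_contra hlt
      exact (findChar_pos s c hpos).2 k (by omega) hc
    -- and every find that succeeds is ≥ k (by minimality of k)
    have hk_le : ∀ c : Char, (c = '#' ∨ c = ';') → 0 ≤ PySem.Chars.find s [c] →
        k ≤ (PySem.Chars.find s [c]).toNat := by
      intro c hcc hpos
      by_contra hlt
      have hg := (findChar_pos s c hpos).1
      have := hmin (PySem.Chars.find s [c]).toNat (by omega)
      rcases hcc with rfl | rfl
      · exact this.1 hg
      · exact this.2 hg
    rcases hmem with hk | hk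
    · -- s[k] = '#'
      have hpos1 : 0 ≤ f1 := findChar_mem s '#' (mem_of_getElem?_some hk)
      have e1 : f1 = (k : Int) := by
        have := hk_lt '#' hk hpos1
        have := hk_le '#' (Or.inl rfl) hpos1
        omega
      -- f2, if it succeeds, is ≥ k
      rcases lt_or_ge f2 0 with h2n | h2p
      · have e2 : f2 = -1 := by omega
        simp [e1, e2]
      · have h2k : k ≤ f2.toNat := hk_le ';' (Or.inr rfl) h2p
        simp [e1]
        intro _ _
        omega
    · -- s[k] = ';'
      have hpos2 : 0 ≤ f2 := findChar_mem s ';' (mem_of_getElem?_some hk)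
      have e2 : f2 = (k : Int) := by
        have := hk_lt ';' hk hpos2
        have := hk_le ';' (Or.inr rfl) hpos2
        omega
      rcases lt_or_ge f1 0 with h1n | h1p
      · have e1 : f1 = -1 := by omega
        simp [e1, e2]
      · have h1k : k ≤ f1.toNat := hk_le '#' (Or.inl rfl) h1p
        simp [e2]
        intro _ _
        omega
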